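-- pv_equiv track=rewrite | github.com/featheru/BlackBoxTesting | testWriterHelp.py | GenerateCC
-- ===== SOURCE A (Python) =====
-- def GenerateCC(prefix, length):
--     newCC = ""
--     newCC += prefix
--     counter = 0
--     while len(newCC) != length:
--         if str(counter) not in prefix:
--             newCC += str(counter)
--         counter = (counter + 1) % 10
--     return newCC
-- ===== SOURCE B (Python) =====
-- def GenerateCC(prefix, length):
--     allowed = [c for c in "0123456789" if c not in prefix]
--     need = length - len(prefix)
--     return prefix + "".join(allowed[i % len(allowed)] for i in range(need))
-- ===== Notes on version B (the rewrite author's own statement) =====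
-- stated objective: simpler
-- what changed: Replaces A's while-loop that cycles a counter 0..9 with per-iteration substring tests by a one-shot filter of the digit string plus a direct indexed fill (allowed[i % len(allowed)] for i in range(need)).
import Mathlib
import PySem

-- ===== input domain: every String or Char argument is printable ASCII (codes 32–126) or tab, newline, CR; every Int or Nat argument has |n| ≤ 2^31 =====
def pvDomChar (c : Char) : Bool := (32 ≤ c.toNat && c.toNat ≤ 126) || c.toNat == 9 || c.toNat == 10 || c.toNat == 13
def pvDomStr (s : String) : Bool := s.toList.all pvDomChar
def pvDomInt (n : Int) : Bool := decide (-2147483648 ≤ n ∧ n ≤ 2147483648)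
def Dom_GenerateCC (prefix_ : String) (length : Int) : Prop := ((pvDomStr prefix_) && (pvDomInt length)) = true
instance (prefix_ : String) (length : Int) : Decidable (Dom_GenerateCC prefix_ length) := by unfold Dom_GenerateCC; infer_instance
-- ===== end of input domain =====

-- B replaces A's counter-cycling while loop by a one-shot filter of the digit string plus a direct indexed fill (objective: simpler).

-- ===== PORT A =====
-- A's while loop; the fuel argument is a totality guard only: under Pre_ the fuel below is never
-- exhausted, and outside Pre_ (where the Python loop never terminates) nothing is claimed.
def GenerateCC_loop (prefix_ : String) (length : Int) : Nat → List Char → Int → List Char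
  | 0, newCC, _ => newCC
  | fuel+1, newCC, counter =>
    if (newCC.length : Int) = length then newCC
    else
      let newCC' := if PySem.Str.isIn (PySem.Int.toStr counter) prefix_ = false
                    then newCC ++ (PySem.Int.toStr counter).toList else newCC
      GenerateCC_loop prefix_ length fuel newCC' (PySem.Int.mod (counter + 1) 10)

def GenerateCC (prefix_ : String) (length : Int) : String :=
  String.ofList (GenerateCC_loop prefix_ length
    ((length - (PySem.Str.len prefix_ : Int)).toNat * 10 + 10) prefix_.toList 0)

-- ===== PORT B =====
-- 'c not in prefix' for each single character c of "0123456789" is exactly PySem.Chars.isIn [c] prefix.toList = false;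
-- allowed[i % len(allowed)] is PySem.List.pyGetD (in range whenever allowed ≠ [], which Pre_ guarantees when the range is nonempty)
def GenerateCC_alt (prefix_ : String) (length : Int) : String :=
  let allowed : List Char := "0123456789".toList.filter (fun c => !(PySem.Chars.isIn [c] prefix_.toList))
  let need : Int := length - (PySem.Str.len prefix_ : Int)
  String.ofList (prefix_.toList ++
    ((PySem.List.pyRange 0 need 1).map
      (fun i => PySem.List.pyGetD allowed (PySem.Int.mod i (allowed.length : Int)) ' ')))

-- ===== PRECONDITION & SPEC =====
-- Pre_ excludes exactly the inputs on which A's while loop never terminates (A returns on no input outside Pre_):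
-- length below len(prefix), or length above len(prefix) while prefix contains all ten digits.
def Pre_GenerateCC (prefix_ : String) (length : Int) : Prop :=
  (PySem.Str.len prefix_ : Int) ≤ length ∧
  (length = (PySem.Str.len prefix_ : Int) ∨
    "0123456789".toList.filter (fun c => !(PySem.Chars.isIn [c] prefix_.toList)) ≠ [])
instance (prefix_ : String) (length : Int) : Decidable (Pre_GenerateCC prefix_ length) := by
  unfold Pre_GenerateCC; infer_instance
def pvWitness_GenerateCC : String × Int := ("12", 6)

def Spec_GenerateCC (prefix_ : String) (length : Int) (out : String) : Prop := out = GenerateCC_alt prefix_ length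
instance (prefix_ : String) (length : Int) (out : String) : Decidable (Spec_GenerateCC prefix_ length out) := by unfold Spec_GenerateCC; infer_instance

-- ===== CLAIM (what is proved, stated in full; the proofs are below) =====
def Claim_equal_GenerateCC : Prop := ∀ (prefix_ : String) (length : Int), Dom_GenerateCC prefix_ length → Pre_GenerateCC prefix_ length → Spec_GenerateCC prefix_ length (GenerateCC prefix_ length)

-- ===== LEMMAS AND PROOFS =====

-- the ten digit characters
def pvDigits : List Char := "0123456789".toList

-- the allowed digits, in ascending order
def pvAllowed (p : String) : List Char :=
  pvDigits.filter (fun c => !(PySem.Chars.isIn [c] p.toList))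

-- the suffix both programs append: the allowed digits repeated cyclically, n characters
def pvCycleFill (al : List Char) (n : Nat) : List Char :=
  if h : al = [] ∨ n ≤ al.length then al.take n
  else al ++ pvCycleFill al (n - al.length)
termination_by n
decreasing_by
  push Not at h
  have : al.length ≠ 0 := by simpa [List.length_eq_zero_iff] using h.1
  omega

-- one pass of A's loop over the digit suffix ds: stop flag true iff the length check fired
def pvSeg (p : String) (length : Int) : List Char → List Char → List Char × Bool
  | cc, [] => (cc, false)
  | cc, d :: ds =>
    if (cc.length : Int) = length then (cc, true)
    else pvSeg p length (if PySem.Chars.isIn [d] p.toList = false then cc ++ [d] else cc) ds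

lemma pv_toStr_digit (k : Nat) (hk : k ≤ 9) :
    (PySem.Int.toStr (k : Int)).toList = [pvDigits.getD k ' '] := by
  interval_cases k <;> decide

lemma pv_digits_drop (c : Nat) (hc : c ≤ 9) :
    pvDigits.drop c = pvDigits.getD c ' ' :: pvDigits.drop (c+1) := by
  interval_cases c <;> decide

lemma pv_mod_ten (c : Nat) (hc : c ≤ 9) :
    PySem.Int.mod ((c : Int) + 1) 10 = (((c+1) % 10 : Nat) : Int) := by
  interval_cases c <;> decide

-- a full counter pass c, c+1, …, 9 of A's loop is one pvSeg pass over the digit suffix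
lemma pv_loop_seg (p : String) (length : Int) :
    ∀ (m c : Nat), c + m = 10 → 1 ≤ m → ∀ (fuel : Nat) (cc : List Char),
      GenerateCC_loop p length (fuel + m) cc (c : Int) =
        (let s := pvSeg p length cc (pvDigits.drop c)
         if s.2 then s.1 else GenerateCC_loop p length fuel s.1 0) := by
  intro m
  induction m with
  | zero => omega
  | succ m ih =>
    intro c hc _ fuel cc
    have hc9 : c ≤ 9 := by omega
    rw [pv_digits_drop c hc9]
    show GenerateCC_loop p length ((fuel + m) + 1) cc (c : Int) = _
    rw [GenerateCC_loop]
    simp only [pvSeg]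
    by_cases hstop : (cc.length : Int) = length
    · simp [hstop]
    · simp only [hstop, if_false]
      have hbridge : PySem.Str.isIn (PySem.Int.toStr (c : Int)) p
          = PySem.Chars.isIn [pvDigits.getD c ' '] p.toList := by
        have := pv_toStr_digit c hc9
        simp [PySem.Str.isIn, this]
      rw [hbridge, pv_mod_ten c hc9, pv_toStr_digit c hc9]
      rcases Nat.lt_or_ge c 9 with hlt | hge
      · have h1 : (c+1) % 10 = c + 1 := by omega
        rw [h1, ih (c+1) (by omega) (by omega) fuel]
      · have hc9' : c = 9 := by omega
        subst hc9'
        have hm : m = 0 := by omega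
        subst hm
        have h10 : pvDigits.drop 10 = [] := by decide
        have h9 : (9:Nat) % 10 = 9 := by norm_num
        simp only [h10, pvSeg] at *
        norm_num

-- pvSeg appends the allowed part of ds, truncated at the remaining quota
lemma pv_seg_fst (p : String) (length : Int) :
    ∀ (ds cc : List Char), (cc.length : Int) ≤ length →
      (pvSeg p length cc ds).1 =
        cc ++ (ds.filter (fun d => !(PySem.Chars.isIn [d] p.toList))).take (length - cc.length).toNat := by
  intro ds
  induction ds with
  | nil => intro cc h; simp [pvSeg]
  | cons d ds ih =>
    intro cc h
    by_cases hstop : (cc.length : Int) = length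
    · have : (length - (cc.length : Int)).toNat = 0 := by omega
      simp [pvSeg, hstop]
    · have hlt : (cc.length : Int) < length := lt_of_le_of_ne h hstop
      simp only [pvSeg, if_neg hstop]
      by_cases hd : PySem.Chars.isIn [d] p.toList = false
      · rw [if_pos hd, ih (cc ++ [d]) (by simp; omega)]
        have hm : (length - (cc.length : Int)).toNat
            = ((length - ((cc ++ [d]).length : Int)).toNat) + 1 := by simp; omega
        simp [hd, hm]
      · rw [if_neg hd, ih cc h]
        simp [hd]

-- if the stop flag fired, the quota was reached
lemma pv_seg_true (p : String) (length : Int) :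
    ∀ (ds cc : List Char), (pvSeg p length cc ds).2 = true →
      (((pvSeg p length cc ds).1.length : Int) = length) := by
  intro ds
  induction ds with
  | nil => intro cc h; simp [pvSeg] at h
  | cons d ds ih =>
    intro cc h
    by_cases hstop : (cc.length : Int) = length
    · simpa [pvSeg, hstop] using hstop
    · simp only [pvSeg, if_neg hstop] at h ⊢
      exact ih _ h

lemma pv_loop_stop (p : String) (length : Int) (fuel : Nat) (cc : List Char) (c : Int)
    (h : (cc.length : Int) = length) : GenerateCC_loop p length (fuel + 1) cc c = cc := by
  simp [GenerateCC_loop, h]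

-- A's loop, started at counter 0 with quota n and enough fuel, appends pvCycleFill
lemma pv_loop_fill (p : String) (length : Int) :
    ∀ (n : Nat), ∀ (fuel : Nat) (cc : List Char),
      length - (cc.length : Int) = (n : Int) →
      (pvAllowed p ≠ [] ∨ n = 0) →
      10 * n + 1 ≤ fuel →
      GenerateCC_loop p length fuel cc 0 = cc ++ pvCycleFill (pvAllowed p) n := by
  intro n
  induction n using Nat.strong_induction_on with
  | _ n IH =>
    intro fuel cc hlen hal hfuel
    rcases Nat.eq_zero_or_pos n with h0 | hpos
    · subst h0
      obtain ⟨f, rfl⟩ : ∃ f, fuel = f + 1 := ⟨fuel - 1, by omega⟩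
      rw [pv_loop_stop p length f cc 0 (by omega)]
      rw [pvCycleFill]
      simp
    · have halne : pvAllowed p ≠ [] := by rcases hal with h | h; exact h; omega
      have hL1 : 1 ≤ (pvAllowed p).length := by
        rcases Nat.eq_zero_or_pos (pvAllowed p).length with h | h
        · exact absurd (List.length_eq_zero_iff.mp h) halne
        · exact h
      obtain ⟨f, rfl⟩ : ∃ f, fuel = f + 10 := ⟨fuel - 10, by omega⟩
      have hseg := pv_loop_seg p length 10 0 (by norm_num) (by norm_num) f cc
      norm_num at hseg
      rw [hseg]
      have hle : (cc.length : Int) ≤ length := by omega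
      have hfst := pv_seg_fst p length pvDigits cc hle
      have hm : (length - (cc.length : Int)).toNat = n := by omega
      rw [hm] at hfst
      set s := pvSeg p length cc pvDigits with hs
      have hfstA : s.1 = cc ++ (pvAllowed p).take n := hfst
      by_cases hflag : s.2 = true
      · have hreach := pv_seg_true p length pvDigits cc hflag
        rw [← hs, hfstA] at hreach
        simp only [List.length_append] at hreach
        push_cast at hreach
        have hnle : n ≤ (pvAllowed p).length := by
          by_contra hgt
          have htakeall : (pvAllowed p).take n = pvAllowed p :=
            List.take_of_length_le (by omega)
          rw [htakeall] at hreach; omega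
        simp only [hflag, if_true]
        rw [hfstA, pvCycleFill, dif_pos (Or.inr hnle)]
      · simp only [hflag]
        rw [hfstA]
        by_cases hnle : n ≤ (pvAllowed p).length
        · have htake : ((pvAllowed p).take n).length = n := by
            rw [List.length_take]; omega
          obtain ⟨f', rfl⟩ : ∃ f', f = f' + 1 := ⟨f - 1, by omega⟩
          rw [pv_loop_stop p length f' _ 0 (by simp [htake]; omega)]
          rw [pvCycleFill, dif_pos (Or.inr hnle)]
          simp
        · have htakeall : (pvAllowed p).take n = pvAllowed p := by
            apply List.take_of_length_le; omega
          rw [htakeall]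
          have hrec := IH (n - (pvAllowed p).length) (by omega) f (cc ++ pvAllowed p)
            (by simp; omega) (Or.inl halne) (by omega)
          have hunf : pvCycleFill (pvAllowed p) n
              = pvAllowed p ++ pvCycleFill (pvAllowed p) (n - (pvAllowed p).length) := by
            rw [pvCycleFill, dif_neg (by push Not; exact ⟨halne, by omega⟩)]
          rw [hrec, hunf, List.append_assoc]
          simp

-- B's indexed fill is the same cyclic repetition
lemma pv_fill_eq_cycleFill (al : List Char) :
    ∀ (n : Nat), (al ≠ [] ∨ n = 0) →
      (List.range n).map (fun k => al.getD (k % al.length) ' ') = pvCycleFill al n := by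
  intro n
  induction n using Nat.strong_induction_on with
  | _ n IH =>
    intro hal
    rcases Nat.eq_zero_or_pos n with h0 | hpos
    · subst h0
      rw [pvCycleFill]
      simp
    · have halne : al ≠ [] := by rcases hal with h | h; exact h; omega
      have hL1 : 1 ≤ al.length := by
        rcases Nat.eq_zero_or_pos al.length with h | h
        · exact absurd (List.length_eq_zero_iff.mp h) halne
        · exact h
      by_cases hnle : n ≤ al.length
      · rw [pvCycleFill, dif_pos (Or.inr hnle)]
        apply List.ext_getElem
        · simp [List.length_take]; omega
        · intro i h1 h2
          have hin : i < n := by simpa using h1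
          have hiL : i < al.length := by omega
          have hmod : i % al.length = i := Nat.mod_eq_of_lt hiL
          simp [hmod, List.getD_eq_getElem?_getD, List.getElem?_eq_getElem hiL]
      · obtain ⟨r, rfl⟩ : ∃ r, n = al.length + r := ⟨n - al.length, by omega⟩
        rw [List.range_add, List.map_append, List.map_map]
        have h1 : (List.range al.length).map (fun k => al.getD (k % al.length) ' ') = al := by
          apply List.ext_getElem
          · simp
          · intro i hi1 hi2
            have hiL : i < al.length := by simpa using hi1
            have hmod : i % al.length = i := Nat.mod_eq_of_lt hiL
            simp [hmod, List.getD_eq_getElem?_getD, List.getElem?_eq_getElem hiL]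
        have h2 : ((fun k => al.getD (k % al.length) ' ') ∘ (fun k => al.length + k))
            = (fun k => al.getD (k % al.length) ' ') := by
          funext k
          simp [Nat.add_mod_left]
        rw [h1, h2, IH r (by omega) (Or.inl halne)]
        have hunf : pvCycleFill al (al.length + r)
            = al ++ pvCycleFill al ((al.length + r) - al.length) := by
          rw [pvCycleFill, dif_neg (by push Not; exact ⟨halne, by omega⟩)]
        rw [hunf]
        simp

lemma pv_len_eq (p : String) : PySem.Str.len p = p.toList.length := by simp

lemma pv_pre_allowed (p : String) (length : Int) (h : Pre_GenerateCC p length) :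
    pvAllowed p ≠ [] ∨ (length - (p.toList.length : Int)).toNat = 0 := by
  rcases h with ⟨h1, h2 | h2⟩
  · right; rw [pv_len_eq] at h2; omega
  · left; exact h2

lemma pv_A_eq (p : String) (length : Int) (h : Pre_GenerateCC p length) :
    GenerateCC p length
      = String.ofList (p.toList ++ pvCycleFill (pvAllowed p) (length - (p.toList.length : Int)).toNat) := by
  have hle : (p.toList.length : Int) ≤ length := by
    have := h.1; rw [pv_len_eq] at this; exact this
  unfold GenerateCC
  rw [pv_len_eq]
  congr 1
  exact pv_loop_fill p length (length - (p.toList.length : Int)).toNat _ p.toList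
    (by omega) (pv_pre_allowed p length h) (by omega)

lemma pv_B_eq (p : String) (length : Int) (h : Pre_GenerateCC p length) :
    GenerateCC_alt p length
      = String.ofList (p.toList ++ pvCycleFill (pvAllowed p) (length - (p.toList.length : Int)).toNat) := by
  have hle : (p.toList.length : Int) ≤ length := by
    have := h.1; rw [pv_len_eq] at this; exact this
  have hal : pvAllowed p ≠ [] ∨ (length - (p.toList.length : Int)).toNat = 0 :=
    pv_pre_allowed p length h
  simp only [GenerateCC_alt]
  rw [pv_len_eq]
  set n : Nat := (length - (p.toList.length : Int)).toNat with hn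
  have halv : "0123456789".toList.filter (fun c => !(PySem.Chars.isIn [c] p.toList))
      = pvAllowed p := rfl
  congr 1
  congr 1
  rw [PySem.List.pyRange_one]
  simp only [sub_zero, zero_add, List.map_map]
  rw [halv, ← pv_fill_eq_cycleFill (pvAllowed p) n hal]
  apply List.map_congr_left
  intro k hk
  have hkn : k < n := List.mem_range.mp hk
  simp only [Function.comp]
  rcases hal with halne | h0
  · have hL1 : 1 ≤ (pvAllowed p).length := by
      rcases Nat.eq_zero_or_pos (pvAllowed p).length with hz | hp
      · exact absurd (List.length_eq_zero_iff.mp hz) halne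
      · exact hp
    have hmod : PySem.Int.mod (k : Int) ((pvAllowed p).length : Int)
        = ((k % (pvAllowed p).length : Nat) : Int) := by
      simp only [PySem.Int.mod]
      rw [Int.fmod_eq_emod_of_nonneg _ (by positivity)]
      omega
    rw [hmod, PySem.List.pyGetD_natCast]
  · omega

-- ===== VERDICT (by name: the statement is the Claim_ definition above) =====
theorem GenerateCC_spec : Claim_equal_GenerateCC := by
  intro p length _ hpre
  unfold Spec_GenerateCC
  rw [pv_A_eq p length hpre, pv_B_eq p length hpre]
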